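-- pv_equiv track=rewrite | github.com/Arsen1302/Code-copy-detector | TestData/solutions/problem_1617_4.py | solution_1617_4
-- ===== SOURCE A (Python) =====
-- from typing import List
--
-- def solution_1617_4(nums: List[int]) -> List[int]:
--     dict_numbers = {}
--     for i in nums:
--         if i not in dict_numbers:
--             dict_numbers[i] = 1
--         else:
--             dict_numbers[i] += 1
--
--     count_pairs = 0
--     count_leftovers = 0
--     result = []
--     for k, v in dict_numbers.items():
--
--         if v % 2 != 0:
--             count_pairs += v // 2
--             count_leftovers += v % 2
--         else:
--             count_pairs += v // 2
--     result.append(count_pairs)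
--     result.append(count_leftovers)
--     return result
-- ===== SOURCE B (Python) =====
-- from typing import List
--
-- def solution_1617_4(nums: List[int]) -> List[int]:
--     s = sorted(nums)
--     pairs = 0
--     leftovers = 0
--     i = 0
--     n = len(s)
--     while i < n:
--         if i + 1 < n and s[i] == s[i + 1]:
--             pairs += 1
--             i += 2
--         else:
--             leftovers += 1
--             i += 1
--     return [pairs, leftovers]
-- ===== Notes on version B (the rewrite author's own statement) =====
-- stated objective: alternative
-- what changed: B builds no frequency dictionary at all: it sorts the list and does one adjacent-pair scan over the sorted list (equal neighbours form a pair and are both consumed, otherwise the element is a leftover), instead of A's hash-count pass plus a per-bucket v//2 / v%2 accumulation.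
import Mathlib
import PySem

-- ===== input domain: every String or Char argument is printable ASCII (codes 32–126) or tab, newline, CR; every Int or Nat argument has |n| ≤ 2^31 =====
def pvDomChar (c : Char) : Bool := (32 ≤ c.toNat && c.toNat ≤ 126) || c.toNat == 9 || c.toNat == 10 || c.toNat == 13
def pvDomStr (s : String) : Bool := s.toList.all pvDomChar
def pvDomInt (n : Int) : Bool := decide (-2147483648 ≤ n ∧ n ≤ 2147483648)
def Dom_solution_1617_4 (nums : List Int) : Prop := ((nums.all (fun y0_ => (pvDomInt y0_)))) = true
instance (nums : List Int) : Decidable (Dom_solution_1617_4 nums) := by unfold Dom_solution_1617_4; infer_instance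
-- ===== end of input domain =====

-- B builds no frequency dictionary: it sorts the list and does one adjacent-pair scan
-- (equal neighbours form a pair and are both consumed, otherwise the element is a leftover).

-- ===== PORT A =====
def solution_1617_4 (nums : List Int) : List Int :=
  let dict_numbers : PySem.Dict Int Int :=
    nums.foldl (fun d i =>
      if d.contains i = false then d.insert i 1
      else d.insert i (d.getD i 0 + 1))  -- `d[i] += 1`; key is present in this branch
      PySem.Dict.empty
  let pl : Int × Int :=
    dict_numbers.items.foldl (fun pl kv =>
      if PySem.Int.mod kv.2 2 ≠ 0 then
        (pl.1 + PySem.Int.floordiv kv.2 2, pl.2 + PySem.Int.mod kv.2 2)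
      else
        (pl.1 + PySem.Int.floordiv kv.2 2, pl.2)) (0, 0)
  [pl.1, pl.2]

-- ===== PORT B =====
-- B's `while i < n` scan over the sorted list: the remaining suffix s[i:] is the argument
-- (`i += 2` consumes two elements, `i += 1` consumes one)
def pairScan (s : List Int) (pairs leftovers : Int) : Int × Int :=
  match s with
  | [] => (pairs, leftovers)
  | [_] => (pairs, leftovers + 1)
  | x :: y :: tl =>
    if x == y then pairScan tl (pairs + 1) leftovers
    else pairScan (y :: tl) pairs (leftovers + 1)

def solution_1617_4_alt (nums : List Int) : List Int :=
  let s : List Int := PySem.List.sorted nums (fun v => v) false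
  let pl : Int × Int := pairScan s 0 0
  [pl.1, pl.2]

-- ===== PRECONDITION & SPEC =====
def Spec_solution_1617_4 (nums : List Int) (out : List Int) : Prop := out = solution_1617_4_alt nums
instance (nums : List Int) (out : List Int) : Decidable (Spec_solution_1617_4 nums out) := by unfold Spec_solution_1617_4; infer_instance

-- ===== CLAIM (what is proved, stated in full; the proofs are below) =====
def Claim_equal_solution_1617_4 : Prop := ∀ (nums : List Int), Dom_solution_1617_4 nums → Spec_solution_1617_4 nums (solution_1617_4 nums)

-- ===== LEMMAS AND PROOFS =====

-- A's counting loop builds `counter nums`.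
theorem dictA_eq_counter (nums : List Int) :
    nums.foldl (fun (d : PySem.Dict Int Int) i =>
      if d.contains i = false then d.insert i 1
      else d.insert i (d.getD i 0 + 1)) PySem.Dict.empty
    = PySem.Dict.counter nums := by
  rw [← PySem.Dict.foldl_insert_getD_add_one_eq_counter]
  have hf : (fun (d : PySem.Dict Int Int) i =>
      if d.contains i = false then d.insert i 1
      else d.insert i (d.getD i 0 + 1))
      = (fun (d : PySem.Dict Int Int) i => d.insert i (d.getD i 0 + 1)) := by
    funext d i
    by_cases h : d.contains i = false
    · simp [h, PySem.Dict.getD_of_not_contains d 0 h]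
    · simp [h]
  rw [hf]

-- A's second loop adds Σ v//2 to the first and (number of odd values) to the second component.
theorem foldA_eq (kvs : List (Int × Int)) (p l : Int) :
    kvs.foldl (fun pl (kv : Int × Int) =>
      if PySem.Int.mod kv.2 2 ≠ 0 then
        (pl.1 + PySem.Int.floordiv kv.2 2, pl.2 + PySem.Int.mod kv.2 2)
      else
        (pl.1 + PySem.Int.floordiv kv.2 2, pl.2)) (p, l)
    = (p + ((kvs.map (fun kv => PySem.Int.floordiv kv.2 2)).sum),
       l + (((kvs.filter (fun kv => PySem.Int.mod kv.2 2 ≠ 0)).length : Int))) := by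
  induction kvs generalizing p l with
  | nil => simp
  | cons kv rest ih =>
    have hm : PySem.Int.mod kv.2 2 = kv.2 % 2 := PySem.Int.mod_eq_emod_of_pos (by omega)
    by_cases h : PySem.Int.mod kv.2 2 ≠ 0
    · have h1 : PySem.Int.mod kv.2 2 = 1 := by
        rw [hm] at h ⊢; omega
      rw [List.foldl_cons, if_pos h, ih]
      rw [List.filter_cons, if_pos (by simpa using h)]
      simp only [List.map_cons, List.sum_cons, List.length_cons, Prod.mk.injEq, h1]
      exact ⟨by push_cast; ring, by push_cast; omega⟩
    · rw [List.foldl_cons, if_neg h, ih]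
      rw [List.filter_cons, if_neg (by simpa using h)]
      simp only [List.map_cons, List.sum_cons, Prod.mk.injEq]
      exact ⟨by ring, trivial⟩

-- '// 2' and '% 2' collapsed to the Euclidean operators (positive divisor)
theorem fd2 (c : Int) : PySem.Int.floordiv c 2 = c / 2 :=
  PySem.Int.floordiv_eq_ediv_of_pos (by omega)
theorem md2 (c : Int) : PySem.Int.mod c 2 = c % 2 :=
  PySem.Int.mod_eq_emod_of_pos (by omega)

-- the canonical value of both programs, as data over the distinct elements of `s`
def bucketPairs (s : List Int) : Int :=
  ((PySem.Set.ofList s).map (fun k => ((s.count k : Int)) / 2)).sum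
def bucketOdds (s : List Int) : Int :=
  (((PySem.Set.ofList s).filter (fun k => decide (((s.count k : Int)) % 2 ≠ 0))).length : Int)

-- the buckets only depend on the multiset of elements
theorem bucketPairs_perm (s t : List Int) (h : s.Perm t) : bucketPairs s = bucketPairs t := by
  unfold bucketPairs
  have hfun : (fun k : Int => ((s.count k : Int)) / 2) = (fun k => ((t.count k : Int)) / 2) := by
    funext k; rw [h.count_eq]
  have hset : (PySem.Set.ofList s).Perm (PySem.Set.ofList t) := by
    apply (List.perm_ext_iff_of_nodup (PySem.Set.nodup_ofList s) (PySem.Set.nodup_ofList t)).mpr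
    intro k
    rw [PySem.Set.mem_ofList, PySem.Set.mem_ofList, h.mem_iff]
  rw [hfun, (hset.map _).sum_eq]

theorem bucketOdds_perm (s t : List Int) (h : s.Perm t) : bucketOdds s = bucketOdds t := by
  unfold bucketOdds
  have hfun : (fun k : Int => decide (((s.count k : Int)) % 2 ≠ 0))
      = (fun k => decide (((t.count k : Int)) % 2 ≠ 0)) := by
    funext k; rw [h.count_eq]
  have hset : (PySem.Set.ofList s).Perm (PySem.Set.ofList t) := by
    apply (List.perm_ext_iff_of_nodup (PySem.Set.nodup_ofList s) (PySem.Set.nodup_ofList t)).mpr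
    intro k
    rw [PySem.Set.mem_ofList, PySem.Set.mem_ofList, h.mem_iff]
  rw [hfun, (hset.filter _).length_eq]

-- the distinct elements of `x :: s`, as a permutation of x :: (distinct elements of s minus x)
theorem ofList_cons_perm (x : Int) (s : List Int) :
    (PySem.Set.ofList (x :: s)).Perm (x :: PySem.Set.discard (PySem.Set.ofList s) x) := by
  apply (List.perm_ext_iff_of_nodup (PySem.Set.nodup_ofList _) ?_).mpr
  · intro k
    rw [PySem.Set.mem_ofList, List.mem_cons, List.mem_cons, PySem.Set.mem_discard,
      PySem.Set.mem_ofList]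
    by_cases hk : k = x <;> simp [hk]
  · refine List.Nodup.cons ?_ (PySem.Set.nodup_discard _ _ (PySem.Set.nodup_ofList s))
    intro hx
    exact ((PySem.Set.mem_discard _ _ _).mp hx).2 rfl

-- a head that occurs nowhere else contributes one leftover and no pair
theorem buckets_single_head (x : Int) (rest : List Int) (hx : x ∉ rest) :
    bucketPairs (x :: rest) = bucketPairs rest ∧
    bucketOdds (x :: rest) = 1 + bucketOdds rest := by
  have hD : (PySem.Set.discard (PySem.Set.ofList rest) x).Perm (PySem.Set.ofList rest) := by
    apply (List.perm_ext_iff_of_nodup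
      (PySem.Set.nodup_discard _ _ (PySem.Set.nodup_ofList rest))
      (PySem.Set.nodup_ofList rest)).mpr
    intro k
    simp only [PySem.Set.mem_discard, PySem.Set.mem_ofList]
    exact ⟨fun h => h.1, fun h => ⟨h, fun hk => hx (hk ▸ h)⟩⟩
  have hcx : (x :: rest).count x = 1 := by
    simp [List.count_cons, List.count_eq_zero.mpr hx]
  have hck : ∀ k ∈ PySem.Set.discard (PySem.Set.ofList rest) x,
      (x :: rest).count k = rest.count k := by
    intro k hk
    have hkx : k ≠ x := ((PySem.Set.mem_discard _ _ _).mp hk).2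
    have hne : ¬ x = k := fun h => hkx h.symm
    simp [List.count_cons, hne]
  have hperm := ofList_cons_perm x rest
  constructor
  · unfold bucketPairs
    rw [(hperm.map _).sum_eq, List.map_cons, List.sum_cons, hcx]
    norm_num
    calc ((PySem.Set.discard (PySem.Set.ofList rest) x).map
            (fun k => (((x :: rest).count k : Int)) / 2)).sum
        = ((PySem.Set.discard (PySem.Set.ofList rest) x).map
            (fun k => ((rest.count k : Int)) / 2)).sum := by
          apply congrArg List.sum
          apply List.map_congr_left
          intro k hk; rw [hck k hk]
      _ = ((PySem.Set.ofList rest).map (fun k => ((rest.count k : Int)) / 2)).sum :=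
          (hD.map _).sum_eq
  · unfold bucketOdds
    rw [(hperm.filter _).length_eq, List.filter_cons, hcx]
    rw [if_pos (by norm_num)]
    have : ((PySem.Set.discard (PySem.Set.ofList rest) x).filter
          (fun k => decide ((((x :: rest).count k : Int)) % 2 ≠ 0))).length
        = ((PySem.Set.ofList rest).filter
          (fun k => decide (((rest.count k : Int)) % 2 ≠ 0))).length := by
      rw [List.filter_congr (fun k hk => by rw [hck k hk])]
      exact (hD.filter _).length_eq
    rw [List.length_cons, this]
    push_cast; ring
  -- (the `norm_num` above uses (1:Int)/2 = 0 and (1:Int)%2 = 1)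

-- two equal heads contribute exactly one pair and leave the parities unchanged
theorem buckets_double_head (x : Int) (tl : List Int) :
    bucketPairs (x :: x :: tl) = 1 + bucketPairs tl ∧
    bucketOdds (x :: x :: tl) = bucketOdds tl := by
  set D := PySem.Set.discard (PySem.Set.ofList tl) x with hDdef
  have hnodupD : (x :: D).Nodup := by
    refine List.Nodup.cons ?_ (PySem.Set.nodup_discard _ _ (PySem.Set.nodup_ofList tl))
    intro hx
    exact ((PySem.Set.mem_discard _ _ _).mp hx).2 rfl
  have hperm : (PySem.Set.ofList (x :: x :: tl)).Perm (x :: D) := by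
    apply (List.perm_ext_iff_of_nodup (PySem.Set.nodup_ofList _) hnodupD).mpr
    intro k
    simp only [PySem.Set.mem_ofList, List.mem_cons, hDdef, PySem.Set.mem_discard]
    by_cases hk : k = x <;> simp [hk]
  have hcx : ((x :: x :: tl).count x : Int) = (tl.count x : Int) + 2 := by
    simp [List.count_cons]; push_cast; ring
  have hck : ∀ k ∈ D, (x :: x :: tl).count k = tl.count k := by
    intro k hk
    have hkx : k ≠ x := ((PySem.Set.mem_discard _ _ _).mp hk).2
    have hne : ¬ x = k := fun h => hkx h.symm
    simp [List.count_cons, hne]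
  -- over D both count functions agree
  have hmapD : D.map (fun k => (((x :: x :: tl).count k : Int)) / 2)
      = D.map (fun k => ((tl.count k : Int)) / 2) :=
    List.map_congr_left (fun k hk => by rw [hck k hk])
  have hfilD : D.filter (fun k => decide ((((x :: x :: tl).count k : Int)) % 2 ≠ 0))
      = D.filter (fun k => decide (((tl.count k : Int)) % 2 ≠ 0)) :=
    List.filter_congr (fun k hk => by rw [hck k hk])
  by_cases hmem : x ∈ tl
  -- x also occurs in tl: `ofList tl` is a permutation of x :: D
  · have htl : (PySem.Set.ofList tl).Perm (x :: D) := by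
      apply (List.perm_ext_iff_of_nodup (PySem.Set.nodup_ofList _) hnodupD).mpr
      intro k
      simp only [PySem.Set.mem_ofList, List.mem_cons, hDdef, PySem.Set.mem_discard]
      by_cases hk : k = x <;> simp [hk, hmem]
    constructor
    · unfold bucketPairs
      rw [(hperm.map _).sum_eq, (htl.map _).sum_eq]
      simp only [List.map_cons, List.sum_cons, hmapD, hcx]
      have : ((tl.count x : Int) + 2) / 2 = (tl.count x : Int) / 2 + 1 := by omega
      rw [this]; ring
    · unfold bucketOdds
      rw [(hperm.filter _).length_eq, (htl.filter _).length_eq]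
      simp only [List.filter_cons, hfilD, hcx]
      have hpar : (decide ((((tl.count x : Int)) + 2) % 2 ≠ 0))
          = (decide (((tl.count x : Int)) % 2 ≠ 0)) := by
        by_cases h : ((tl.count x : Int)) % 2 = 0 <;> simp [h] <;> omega
      rw [hpar]
  -- x does not occur in tl: D = ofList tl (as a set) and the x-bucket is exactly one pair
  · have hD : D.Perm (PySem.Set.ofList tl) := by
      apply (List.perm_ext_iff_of_nodup
        (PySem.Set.nodup_discard _ _ (PySem.Set.nodup_ofList tl))
        (PySem.Set.nodup_ofList tl)).mpr
      intro k
      simp only [hDdef, PySem.Set.mem_discard, PySem.Set.mem_ofList]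
      exact ⟨fun h => h.1, fun h => ⟨h, fun hk => hmem (hk ▸ h)⟩⟩
    have hc0 : (tl.count x : Int) = 0 := by
      simp [List.count_eq_zero.mpr hmem]
    constructor
    · unfold bucketPairs
      rw [(hperm.map _).sum_eq]
      simp only [List.map_cons, List.sum_cons, hmapD, hcx, hc0]
      rw [(hD.map _).sum_eq]
      norm_num
    · unfold bucketOdds
      rw [(hperm.filter _).length_eq]
      simp only [List.filter_cons, hfilD, hcx, hc0]
      rw [if_neg (by norm_num), (hD.filter _).length_eq]

-- on a non-decreasing list the adjacent-pair scan computes the bucket sums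
theorem pairScan_eq (s : List Int) (hs : s.Pairwise (· ≤ ·)) (p l : Int) :
    pairScan s p l = (p + bucketPairs s, l + bucketOdds s) := by
  induction hn : s.length using Nat.strong_induction_on generalizing s p l with
  | _ n ih =>
  match s, hs with
  | [], _ => simp [pairScan, bucketPairs, bucketOdds, PySem.Set.ofList_nil]
  | [x], _ =>
    have h := buckets_single_head x [] (by simp)
    have h0p : bucketPairs ([] : List Int) = 0 := by
      simp [bucketPairs, PySem.Set.ofList_nil]
    have h0o : bucketOdds ([] : List Int) = 0 := by
      simp [bucketOdds, PySem.Set.ofList_nil]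
    rw [pairScan, h.1, h.2, h0p, h0o]
    norm_num
  | x :: y :: tl, hs =>
    by_cases hxy : x = y
    · subst hxy
      rw [pairScan, if_pos (by simp)]
      have htl : tl.Pairwise (· ≤ ·) := (List.Pairwise.of_cons (List.Pairwise.of_cons hs))
      have hlen : tl.length < n := by subst hn; simp only [List.length_cons]; omega
      rw [ih tl.length hlen tl htl _ _ rfl]
      have h := buckets_double_head x tl
      rw [h.1, h.2, ← add_assoc]
    · rw [pairScan, if_neg (by simpa using hxy)]
      have hx : x ∉ y :: tl := by
        intro hmem
        have hle : ∀ z ∈ y :: tl, x ≤ z := (List.pairwise_cons.mp hs).1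
        have hyz : ∀ z ∈ tl, y ≤ z := (List.pairwise_cons.mp (List.Pairwise.of_cons hs)).1
        have hxy' : x < y := lt_of_le_of_ne (hle y (by simp)) hxy
        rcases List.mem_cons.mp hmem with h | h
        · exact hxy h
        · exact absurd (hyz x h) (not_le.mpr hxy')
      have hyt : (y :: tl).Pairwise (· ≤ ·) := List.Pairwise.of_cons hs
      have hlen : (y :: tl).length < n := by subst hn; simp
      rw [ih (y :: tl).length hlen (y :: tl) hyt _ _ rfl]
      have h := buckets_single_head x (y :: tl) hx
      rw [h.1, h.2, ← add_assoc]

-- A's result components equal the bucket sums (the counter's items are keys with their counts).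
theorem itemsA_pairs (nums : List Int) :
    ((PySem.Dict.counter nums).items.map
        (fun kv : Int × Int => PySem.Int.floordiv kv.2 2)).sum = bucketPairs nums := by
  rw [PySem.Dict.items_counter]
  simp [bucketPairs, List.map_map, Function.comp_def, fd2]

theorem itemsA_odds (nums : List Int) :
    (((PySem.Dict.counter nums).items.filter
        (fun kv : Int × Int => PySem.Int.mod kv.2 2 ≠ 0)).length : Int) = bucketOdds nums := by
  rw [PySem.Dict.items_counter]
  simp [bucketOdds, List.filter_map, Function.comp_def, md2]

-- ===== VERDICT (by name: the statement is the Claim_ definition above) =====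
theorem solution_1617_4_spec : Claim_equal_solution_1617_4 := by
  intro nums _
  unfold Spec_solution_1617_4 solution_1617_4 solution_1617_4_alt
  simp only [dictA_eq_counter, foldA_eq, zero_add]
  rw [itemsA_pairs, itemsA_odds]
  have hsorted := PySem.List.sorted_pairwise (xs := nums) (key := fun v : Int => v)
  rw [pairScan_eq _ hsorted 0 0]
  have hperm : (PySem.List.sorted nums (fun v : Int => v) false).Perm nums :=
    PySem.List.sorted_perm nums (fun v : Int => v) false
  rw [bucketPairs_perm _ _ hperm, bucketOdds_perm _ _ hperm]
  simp
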